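-- pv_equiv track=rewrite | github.com/pypi-data/pypi-mirror-390 | packages/arch-blueprint/arch_blueprint-0.1.5-py3-none-any.whl/arch_blueprint/blueprint.py | _exclude_sub_modules
-- ===== SOURCE A (Python) =====
-- def _exclude_sub_modules(modules: set[str]) -> set[str]:
--     """Filter out names that are namespaces of other modules in the set."""
--     sorted_names = sorted(modules, key=len, reverse=True)
--     result: set[str] = set()
--
--     for name in sorted_names:
--         is_namespace = False
--         for longer_name in list(result):
--             if name in longer_name:
--                 is_namespace = True
--                 break
--
--         if not is_namespace:
--             result.add(name)
--
--     return result
-- ===== SOURCE B (Python) =====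
-- def _exclude_sub_modules(modules: set[str]) -> set[str]:
--     """Filter out names that are namespaces of other modules in the set."""
--     names = sorted(modules, key=len, reverse=True)
--     return {m for m in names if not any(m != n and m in n for n in names)}
-- ===== Notes on version B (the rewrite author's own statement) =====
-- stated objective: simpler
-- what changed: Replaces A's greedy accumulation (scan the growing result set of kept longer names, with break) by a single set comprehension keeping exactly the names that are a substring of no other name; correctness of the direct characterisation rests on transitivity of the substring relation.
import Mathlib
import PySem

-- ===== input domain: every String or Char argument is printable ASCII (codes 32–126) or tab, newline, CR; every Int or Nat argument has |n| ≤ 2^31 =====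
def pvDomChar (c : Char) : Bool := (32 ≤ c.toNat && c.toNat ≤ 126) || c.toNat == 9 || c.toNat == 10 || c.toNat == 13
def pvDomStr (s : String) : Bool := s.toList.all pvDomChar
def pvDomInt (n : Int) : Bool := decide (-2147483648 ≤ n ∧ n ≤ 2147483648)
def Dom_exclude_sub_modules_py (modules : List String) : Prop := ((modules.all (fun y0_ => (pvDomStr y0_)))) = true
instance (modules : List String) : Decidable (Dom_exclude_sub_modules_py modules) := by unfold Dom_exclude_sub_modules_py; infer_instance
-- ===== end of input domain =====

-- B replaces A's greedy accumulation against the growing kept-set by one comprehension keeping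
-- exactly the names that are a substring of no other name (same cost; simpler, no accumulator).


-- ===== PORT A =====
def exclude_sub_modules_py (modules : List String) : List String :=
  let sorted_names := PySem.List.sorted modules (fun s => PySem.Str.len s) true
  sorted_names.foldl
    (fun result name =>
      let is_namespace := result.any (fun longer_name => PySem.Str.isIn name longer_name)
      if is_namespace then result else PySem.Set.add result name)
    PySem.Set.empty

-- ===== PORT B =====
def exclude_sub_modules_py_alt (modules : List String) : List String :=
  let names := PySem.List.sorted modules (fun s => PySem.Str.len s) true
  PySem.Set.ofList
    (names.filter (fun m => ! names.any (fun n => m != n && PySem.Str.isIn m n)))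

-- ===== PRECONDITION & SPEC =====
def Spec_exclude_sub_modules_py (modules : List String) (out : List String) : Prop := out = exclude_sub_modules_py_alt modules
instance (modules : List String) (out : List String) : Decidable (Spec_exclude_sub_modules_py modules out) := by unfold Spec_exclude_sub_modules_py; infer_instance

-- ===== CLAIM (what is proved, stated in full; the proofs are below) =====
def Claim_equal_exclude_sub_modules_py : Prop := ∀ (modules : List String), Dom_exclude_sub_modules_py modules → Spec_exclude_sub_modules_py modules (exclude_sub_modules_py modules)

-- ===== LEMMAS AND PROOFS =====

-- "m survives B's filter": m is a substring of no other name of L.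
def pvGood (L : List String) (m : String) : Bool :=
  ! L.any (fun n => m != n && PySem.Str.isIn m n)

theorem pvIsIn_trans {a b c : String} (h1 : PySem.Str.isIn a b = true)
    (h2 : PySem.Str.isIn b c = true) : PySem.Str.isIn a c = true :=
  (PySem.Str.isIn_iff_infix a c).mpr
    (((PySem.Str.isIn_iff_infix a b).mp h1).trans ((PySem.Str.isIn_iff_infix b c).mp h2))

theorem pvIsIn_len {a b : String} (h : PySem.Str.isIn a b = true) :
    a.toList.length ≤ b.toList.length :=
  ((PySem.Str.isIn_iff_infix a b).mp h).length_le

theorem pvIsIn_antisymm {a b : String} (h : PySem.Str.isIn a b = true)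
    (hl : b.toList.length ≤ a.toList.length) : a = b :=
  String.toList_inj.mp (List.IsInfix.eq_of_length_le ((PySem.Str.isIn_iff_infix a b).mp h) hl)

theorem pvExists_max (S : List String) (h : S ≠ []) :
    ∃ n ∈ S, ∀ m ∈ S, m.toList.length ≤ n.toList.length := by
  induction S with
  | nil => exact absurd rfl h
  | cons x t ih =>
    cases t with
    | nil => exact ⟨x, by simp⟩
    | cons y u =>
      obtain ⟨n, hn, hmax⟩ := ih (by simp)
      by_cases hx : x.toList.length ≤ n.toList.length
      · exact ⟨n, List.mem_cons_of_mem _ hn, by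
          intro m hm; rcases List.mem_cons.mp hm with rfl | hm
          · exact hx
          · exact hmax m hm⟩
      · exact ⟨x, List.mem_cons_self, by
          intro m hm; rcases List.mem_cons.mp hm with rfl | hm
          · exact le_refl _
          · exact le_trans (hmax m hm) (le_of_not_ge hx)⟩

theorem pvGood_false_iff (L : List String) (m : String) :
    pvGood L m = false ↔ ∃ n ∈ L, m ≠ n ∧ PySem.Str.isIn m n = true := by
  simp [pvGood, List.any_eq_true, bne_iff_ne]

theorem pvGood_true_elim {L : List String} {m n : String} (hg : pvGood L m = true)
    (hn : n ∈ L) (hne : m ≠ n) : PySem.Str.isIn m n = false := by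
  simp [pvGood, bne_iff_ne] at hg
  simpa using hg n hn hne

-- if m fails B's filter, some strictly longer name CONTAINING m itself passes the filter
theorem pvBad_elim (L : List String) (m : String) (h : pvGood L m = false) :
    ∃ n ∈ L, PySem.Str.isIn m n = true ∧ pvGood L n = true ∧
      m.toList.length < n.toList.length := by
  obtain ⟨n0, hn0L, hne0, hin0⟩ := (pvGood_false_iff L m).mp h
  set S := L.filter (fun n => m != n && PySem.Str.isIn m n) with hS
  have hn0S : n0 ∈ S := by
    simp [hS, List.mem_filter, bne_iff_ne]; exact ⟨hn0L, hne0, hin0⟩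
  obtain ⟨n, hnS, hmax⟩ := pvExists_max S (by intro hnil; rw [hnil] at hn0S; simp at hn0S)
  have hn : n ∈ L ∧ m ≠ n ∧ PySem.Str.isIn m n = true := by
    have := hnS; simp [hS, List.mem_filter, bne_iff_ne] at this; exact ⟨this.1, this.2.1, this.2.2⟩
  refine ⟨n, hn.1, hn.2.2, ?_, ?_⟩
  · by_contra hng
    obtain ⟨n', hn'L, hne', hin'⟩ :=
      (pvGood_false_iff L n).mp (Bool.eq_false_iff.mpr (fun h' => hng h'))
    have hmn' : PySem.Str.isIn m n' = true := pvIsIn_trans hn.2.2 hin'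
    have hn'm : m ≠ n' := by
      rintro rfl
      exact hn.2.1 (pvIsIn_antisymm hn.2.2 (pvIsIn_len hin'))
    have hn'S : n' ∈ S := by
      simp [hS, List.mem_filter, bne_iff_ne]; exact ⟨hn'L, hn'm, hmn'⟩
    exact hne' (pvIsIn_antisymm hin' (hmax n' hn'S))
  · rcases lt_or_ge m.toList.length n.toList.length with h' | h'
    · exact h'
    · exact absurd (pvIsIn_antisymm hn.2.2 h') hn.2.1

theorem pvOfList_append_singleton {xs : List String} {x : String} :
    PySem.Set.ofList (xs ++ [x]) = PySem.Set.add (PySem.Set.ofList xs) x := by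
  simp [PySem.Set.ofList_eq_foldl]

-- the loop invariant of A: after processing a prefix, the result set is exactly
-- the Good elements of that prefix (deduplicated in order)
theorem pvFold_inv (L : List String)
    (hp : L.Pairwise (fun a b => PySem.Str.len b ≤ PySem.Str.len a)) :
    ∀ (suf pre : List String), L = pre ++ suf →
      suf.foldl
        (fun result name =>
          let is_namespace := result.any (fun longer_name => PySem.Str.isIn name longer_name)
          if is_namespace then result else PySem.Set.add result name)
        (PySem.Set.ofList (pre.filter (pvGood L)))
      = PySem.Set.ofList (L.filter (pvGood L)) := by
  intro suf
  induction suf with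
  | nil => intro pre hpre; simp [hpre]
  | cons name rest ih =>
    intro pre hpre
    have hstep :
        (let is_namespace := (PySem.Set.ofList (pre.filter (pvGood L))).any
            (fun longer_name => PySem.Str.isIn name longer_name)
         if is_namespace then PySem.Set.ofList (pre.filter (pvGood L))
         else PySem.Set.add (PySem.Set.ofList (pre.filter (pvGood L))) name)
        = PySem.Set.ofList ((pre ++ [name]).filter (pvGood L)) := by
      dsimp only
      by_cases hgood : pvGood L name = true
      · -- name is kept by both
        rw [List.filter_append]
        simp only [List.filter_cons, hgood, if_true, List.filter_nil]
        rw [pvOfList_append_singleton]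
        by_cases hany : (PySem.Set.ofList (pre.filter (pvGood L))).any
            (fun longer_name => PySem.Str.isIn name longer_name) = true
        · -- the only possible hit is name itself, already in the set: add is a no-op
          obtain ⟨n, hnmem, hin⟩ := List.any_eq_true.mp hany
          have hnpre : n ∈ pre := (List.mem_filter.mp ((PySem.Set.mem_ofList _ _).mp hnmem)).1
          have heq : name = n := by
            by_contra hne
            have := pvGood_true_elim hgood (hpre ▸ List.mem_append_left _ hnpre) hne
            rw [this] at hin; exact Bool.false_ne_true hin
          subst heq
          have hcontains : (PySem.Set.ofList (pre.filter (pvGood L))).contains name = true :=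
            (PySem.Set.contains_iff _ _).mpr hnmem
          rw [if_pos hany]
          simp only [PySem.Set.add, hcontains]
          rfl
        · rw [if_neg hany]
      · -- name is excluded by both: some good strictly longer superstring sits in pre
        have hgood' : pvGood L name = false := Bool.not_eq_true _ ▸ eq_false_of_ne_true hgood
        obtain ⟨n, hnL, hin, hgn, hlen⟩ := pvBad_elim L name hgood'
        have hnpre : n ∈ pre := by
          rcases List.mem_append.mp (hpre ▸ hnL) with h | h
          · exact h
          · rcases List.mem_cons.mp h with rfl | h
            · omega
            · -- n after name in sorted-desc order would be no longer than name
              have hrel : PySem.Str.len n ≤ PySem.Str.len name := by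
                rw [hpre] at hp
                have h2 := (List.pairwise_append.mp hp).2.1
                exact (List.pairwise_cons.mp h2).1 n h
              simp only [PySem.Str.len_eq] at hrel
              omega
        have hany : (PySem.Set.ofList (pre.filter (pvGood L))).any
            (fun longer_name => PySem.Str.isIn name longer_name) = true := by
          refine List.any_eq_true.mpr ⟨n, ?_, hin⟩
          exact (PySem.Set.mem_ofList _ _).mpr (List.mem_filter.mpr ⟨hnpre, hgn⟩)
        rw [if_pos hany]
        simp [List.filter_append, hgood']
    rw [List.foldl_cons, hstep, ih (pre ++ [name]) (by rw [hpre, List.append_assoc]; rfl)]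

-- ===== VERDICT (by name: the statement is the Claim_ definition above) =====
theorem exclude_sub_modules_py_spec : Claim_equal_exclude_sub_modules_py := by
  intro modules _
  unfold Spec_exclude_sub_modules_py exclude_sub_modules_py exclude_sub_modules_py_alt
  show (PySem.List.sorted modules (fun s => PySem.Str.len s) true).foldl
        (fun result name =>
          let is_namespace := result.any (fun longer_name => PySem.Str.isIn name longer_name)
          if is_namespace then result else PySem.Set.add result name)
        (PySem.Set.ofList (List.filter (pvGood (PySem.List.sorted modules (fun s => PySem.Str.len s) true)) []))
      = PySem.Set.ofList
          (List.filter (pvGood (PySem.List.sorted modules (fun s => PySem.Str.len s) true))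
            (PySem.List.sorted modules (fun s => PySem.Str.len s) true))
  exact pvFold_inv (PySem.List.sorted modules (fun s => PySem.Str.len s) true)
    (PySem.List.sorted_pairwise_rev modules (fun s => PySem.Str.len s))
    (PySem.List.sorted modules (fun s => PySem.Str.len s) true) [] rfl
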